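-- pv_equiv track=rewrite | github.com/algorithm-study-2021/Algorithm_Study_2021 | 김유진/5week/3_song.py | makeRepeat
-- ===== SOURCE A (Python) =====
-- def makeRepeat(length,melody):
--     factor=melody.split() #모든 문자가 요소
--
--     index=0;
--     while len(melody)<=length:
--         if index==len(factor):
--             index=0
--
--         melody+=factor[index]
--         index+=1
--
--     return melody
-- ===== SOURCE B (Python) =====
-- def makeRepeat(length, melody):
--     if len(melody) > length:
--         return melody
--     factor = melody.split()
--     S = ''.join(factor)
--     s = len(S)                      # raises ZeroDivisionError below when factor is empty (A raises IndexError there)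
--     need = length - len(melody) + 1 # strictly exceed `length`
--     q = (need - 1) // s             # whole factor-cycles appended
--     r = need - q * s                # 1 <= r <= s: chars still missing after q cycles
--     parts = []
--     acc = 0
--     for t in factor:
--         parts.append(t)
--         acc += len(t)
--         if acc >= r:
--             break
--     return melody + S * q + ''.join(parts)
-- ===== Notes on version B (the rewrite author's own statement) =====
-- stated objective: alternative
-- what changed: A grows the string one token at a time in a while loop; B computes the number of whole factor-cycles in closed form by integer division, scans the token lengths once for the minimal extra prefix that strictly exceeds the target, and assembles the result with one string-multiply and join.
import Mathlib
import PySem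

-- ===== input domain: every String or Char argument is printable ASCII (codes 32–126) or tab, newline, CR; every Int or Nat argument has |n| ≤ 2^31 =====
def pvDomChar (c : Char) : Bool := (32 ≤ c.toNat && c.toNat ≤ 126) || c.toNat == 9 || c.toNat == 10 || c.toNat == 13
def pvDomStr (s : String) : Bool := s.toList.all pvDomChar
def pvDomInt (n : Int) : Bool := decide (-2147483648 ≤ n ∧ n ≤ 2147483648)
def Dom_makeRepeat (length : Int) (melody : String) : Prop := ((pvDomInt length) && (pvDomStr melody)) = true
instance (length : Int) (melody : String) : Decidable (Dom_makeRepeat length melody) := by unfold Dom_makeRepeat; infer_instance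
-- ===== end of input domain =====

-- B replaces A's one-token-at-a-time while loop by closed-form arithmetic: whole factor-cycles
-- via integer division plus one scan for the minimal extra token prefix (objective: alternative).

-- ===== PORT A =====
-- A's while loop; `fuel` only makes the recursion structural (the loop body appends a nonempty
-- token each pass, so (length + 1 - len melody) passes always suffice); the `none` branch is
-- Python's IndexError on empty `factor`, excluded by Pre_.
def makeRepeatLoop (length : Int) (factor : List (List Char)) (melody : List Char) (index : Nat) : Nat → List Char
  | 0 => melody
  | fuel + 1 =>
    if PySem.List.len melody ≤ length then
      let index' := if index = factor.length then 0 else index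
      match PySem.List.pyGet? factor (index' : Int) with
      | none => melody            -- Python raises IndexError here; outside Pre_
      | some t => makeRepeatLoop length factor (melody ++ t) (index' + 1) fuel
    else melody

def makeRepeat (length : Int) (melody : String) : String :=
  let mel := melody.toList
  let factor := PySem.Chars.split₀ mel
  String.ofList (makeRepeatLoop length factor mel 0 (length + 1 - mel.length).toNat)

-- ===== PORT B =====
-- B's for-loop with break: the minimal token prefix whose cumulative length reaches r.
def altScan (r : Int) : List (List Char) → Int → List (List Char)
  | [], _ => []
  | t :: ts, acc =>
    let acc' := acc + PySem.List.len t
    if r ≤ acc' then [t] else t :: altScan r ts acc'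

def makeRepeat_alt (length : Int) (melody : String) : String :=
  let mel := melody.toList
  if length < PySem.List.len mel then melody
  else
    let factor := PySem.Chars.split₀ mel
    let S := PySem.Chars.join [] factor
    let s : Int := PySem.List.len S
    let need : Int := length - mel.length + 1
    let q := PySem.Int.floordiv (need - 1) s
    let r := need - q * s
    String.ofList (mel ++ PySem.List.pyRepeat S q ++ PySem.Chars.join [] (altScan r factor 0))

-- ===== PRECONDITION & SPEC =====
-- Pre_ excludes exactly the inputs on which A raises IndexError (melody has no non-whitespace
-- token and its length does not already exceed `length`); B raises ZeroDivisionError there.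
def Pre_makeRepeat (length : Int) (melody : String) : Prop :=
  length < PySem.Str.len melody ∨ PySem.Chars.split₀ melody.toList ≠ []
instance (length : Int) (melody : String) : Decidable (Pre_makeRepeat length melody) := by unfold Pre_makeRepeat; infer_instance
def pvWitness_makeRepeat : Int × String := (10, "ab c")

def Spec_makeRepeat (length : Int) (melody : String) (out : String) : Prop := out = makeRepeat_alt length melody
instance (length : Int) (melody : String) (out : String) : Decidable (Spec_makeRepeat length melody out) := by unfold Spec_makeRepeat; infer_instance

-- ===== CLAIM (what is proved, stated in full; the proofs are below) =====
def Claim_equal_makeRepeat : Prop := ∀ (length : Int) (melody : String), Dom_makeRepeat length melody → Pre_makeRepeat length melody → Spec_makeRepeat length melody (makeRepeat length melody)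

-- ===== LEMMAS AND PROOFS =====
lemma pvJoinFlatten (ps : List (List Char)) : PySem.Chars.join [] ps = ps.flatten := by
  simp [PySem.Chars.join, List.intercalate]
  induction ps with
  | nil => simp
  | cons h t ih => cases t <;> simp_all [List.intersperse]

-- every token that Python's split() produces is nonempty (invariant of split₀.go's accumulator)
lemma pvGoNonempty : ∀ (s cur acc : _), (∀ t ∈ acc, t ≠ ([] : List Char)) →
    ∀ t ∈ PySem.Chars.split₀.go s cur acc, t ≠ [] := by
  intro s
  induction s with
  | nil =>
    intro cur acc hacc t ht
    by_cases h : cur.isEmpty <;> simp [PySem.Chars.split₀.go, h] at ht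
    · exact hacc t ht
    · rcases ht with ht | ht
      · exact hacc t ht
      · subst ht; simpa [List.isEmpty_iff] using h
  | cons c rest ih =>
    intro cur acc hacc t ht
    by_cases hs : PySem.Chars.isspace c
    · by_cases h : cur.isEmpty
      · simp only [PySem.Chars.split₀.go, hs, h, if_true] at ht
        exact ih [] acc hacc t ht
      · simp only [PySem.Chars.split₀.go, hs, h, if_true] at ht
        refine ih [] (cur.reverse :: acc) ?_ t ht
        intro u hu
        rcases List.mem_cons.mp hu with hu | hu
        · subst hu; simpa [List.isEmpty_iff] using h
        · exact hacc u hu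
    · simp only [PySem.Chars.split₀.go, hs] at ht
      exact ih (c :: cur) acc hacc t ht

lemma pvSplitNonempty (s : List Char) : ∀ t ∈ PySem.Chars.split₀ s, t ≠ [] :=
  pvGoNonempty s [] [] (by simp)

lemma pvLenLeSum (F : List (List Char)) (htok : ∀ t ∈ F, t ≠ []) :
    F.length ≤ (F.map List.length).sum := by
  induction F with
  | nil => simp
  | cons t ts ih =>
    have h1 : 1 ≤ t.length := List.length_pos_iff.mpr (htok t (by simp))
    have := ih (fun u hu => htok u (by simp [hu]))
    simp only [List.map_cons, List.sum_cons, List.length_cons]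
    omega

-- once the melody already exceeds `length`, A's loop returns it unchanged
lemma pvStop (L : Int) (F : List (List Char)) (m : List Char) (i : Nat) (fuel : Nat)
    (h : L < m.length) : makeRepeatLoop L F m i fuel = m := by
  cases fuel with
  | zero => rfl
  | succ n => simp [makeRepeatLoop, PySem.List.len_eq]; omega

-- index = len(factor) is reset to 0 before it is ever used
lemma pvReset (L : Int) (F : List (List Char)) (m : List Char) (fuel : Nat) :
    makeRepeatLoop L F m F.length fuel = makeRepeatLoop L F m 0 fuel := by
  cases fuel with
  | zero => rfl
  | succ n =>
    simp only [makeRepeatLoop]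
    by_cases h : (0 : Nat) = F.length
    · simp [← h]
    · simp [h]

-- partial cycle: while the missing length fits into the remaining tokens, A's loop
-- appends exactly the minimal token prefix that B's scan selects
lemma pvPC (L : Int) (F : List (List Char)) (htok : ∀ t ∈ F, t ≠ []) :
    ∀ (rest : List (List Char)) (i : Nat) (m : List Char) (fuel : Nat) (acc r : Int),
      F.drop i = rest →
      r = (L + 1 - m.length) + acc →
      1 ≤ L + 1 - (m.length : Int) →
      L + 1 - (m.length : Int) ≤ ((rest.map List.length).sum : Int) →
      L + 1 - (m.length : Int) ≤ (fuel : Int) →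
      makeRepeatLoop L F m i fuel = m ++ (altScan r rest acc).flatten := by
  intro rest
  induction rest with
  | nil =>
    intro i m fuel acc r hdrop hr h1 h2 h3
    simp at h2; omega
  | cons t ts ih =>
    intro i m fuel acc r hdrop hr h1 h2 h3
    have hi : i < F.length := by
      by_contra hge
      have : F.drop i = [] := List.drop_eq_nil_of_le (by omega)
      simp [this] at hdrop
    have hget : F[i]? = some t := by
      have h0 : (List.drop i F)[0]? = F[i + 0]? := List.getElem?_drop
      rw [hdrop] at h0
      simpa using h0.symm
    have htmem : t ∈ F := List.mem_of_getElem? hget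
    have htlen : 1 ≤ t.length := List.length_pos_iff.mpr (htok t htmem)
    cases fuel with
    | zero => exfalso; simp at h3; omega
    | succ fuel =>
      rw [makeRepeatLoop]
      rw [if_pos (by simp [PySem.List.len_eq]; omega)]
      simp only [if_neg (by omega : ¬ i = F.length)]
      rw [PySem.List.pyGet?_natCast, hget]
      show makeRepeatLoop L F (m ++ t) (i + 1) fuel = _
      by_cases hcase : (L + 1 - (m.length : Int)) ≤ t.length
      · have : makeRepeatLoop L F (m ++ t) (i+1) fuel = m ++ t := by
          apply pvStop; simp; omega
        rw [this]
        rw [altScan, if_pos (by simp [PySem.List.len_eq]; omega)]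
        simp
      · rw [ih (i+1) (m ++ t) fuel (acc + t.length) r ?_ ?_ ?_ ?_ ?_]
        · rw [altScan, if_neg (by simp [PySem.List.len_eq]; omega)]
          simp [PySem.List.len_eq]
        · rw [← List.drop_drop]
          simp [hdrop]
        · simp; omega
        · simp; omega
        · simp at h2 ⊢; omega
        · simp; omega

-- full cycle: while more than one whole pass is still missing, a pass over the remaining
-- tokens appends their concatenation
lemma pvFC (L : Int) (F : List (List Char)) (htok : ∀ t ∈ F, t ≠ []) :
    ∀ (rest : List (List Char)) (i : Nat) (m : List Char) (fuel : Nat),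
      F.drop i = rest → i ≤ F.length →
      ((rest.map List.length).sum : Int) < L + 1 - (m.length : Int) →
      L + 1 - (m.length : Int) ≤ (fuel : Int) →
      makeRepeatLoop L F m i fuel
        = makeRepeatLoop L F (m ++ rest.flatten) F.length (fuel - rest.length) := by
  intro rest
  induction rest with
  | nil =>
    intro i m fuel hdrop hle h1 h2
    have : i = F.length := by
      have := List.drop_eq_nil_iff.mp hdrop
      omega
    subst this
    simp
  | cons t ts ih =>
    intro i m fuel hdrop hle h1 h2
    have hi : i < F.length := by
      by_contra hge
      have : F.drop i = [] := List.drop_eq_nil_of_le (by omega)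
      simp [this] at hdrop
    have hget : F[i]? = some t := by
      have h0 : (List.drop i F)[0]? = F[i + 0]? := List.getElem?_drop
      rw [hdrop] at h0
      simpa using h0.symm
    have htmem : t ∈ F := List.mem_of_getElem? hget
    have htlen : 1 ≤ t.length := List.length_pos_iff.mpr (htok t htmem)
    cases fuel with
    | zero => exfalso; simp at h2; omega
    | succ fuel =>
      rw [makeRepeatLoop]
      rw [if_pos (by simp [PySem.List.len_eq]; omega)]
      simp only [if_neg (by omega : ¬ i = F.length)]
      rw [PySem.List.pyGet?_natCast, hget]
      show makeRepeatLoop L F (m ++ t) (i + 1) fuel = _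
      rw [ih (i+1) (m ++ t) fuel ?_ ?_ ?_ ?_]
      · simp
      · rw [← List.drop_drop]; simp [hdrop]
      · omega
      · simp at h1 ⊢; omega
      · simp at h2 ⊢; omega

-- Q whole cycles followed by the minimal extra prefix: A's loop from index 0 produces
-- exactly B's closed-form decomposition
lemma pvMain (L : Int) (F : List (List Char)) (htok : ∀ t ∈ F, t ≠ []) :
    ∀ (Q : Nat) (m : List Char) (fuel : Nat),
      (Q : Int) * ((F.map List.length).sum : Int) < L + 1 - (m.length : Int) →
      L + 1 - (m.length : Int) ≤ ((Q : Int) + 1) * ((F.map List.length).sum : Int) →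
      L + 1 - (m.length : Int) ≤ (fuel : Int) →
      makeRepeatLoop L F m 0 fuel
        = m ++ (List.replicate Q F.flatten).flatten
            ++ (altScan (L + 1 - (m.length : Int) - (Q : Int) * ((F.map List.length).sum : Int)) F 0).flatten := by
  intro Q
  induction Q with
  | zero =>
    intro m fuel h1 h2 h3
    rw [Nat.cast_zero, zero_mul] at h1
    rw [Nat.cast_zero, zero_add, one_mul] at h2
    simp only [Nat.cast_zero, zero_mul, sub_zero, List.replicate_zero,
      List.flatten_nil, List.append_nil]
    rw [pvPC L F htok F 0 m fuel 0 (L + 1 - (m.length : Int)) rfl (by ring) (by omega) h2 h3]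
  | succ Q ih =>
    intro m fuel h1 h2 h3
    have hq1 : ((Q + 1 : Nat) : Int) = (Q : Int) + 1 := by push_cast; ring
    rw [hq1] at h1 h2 ⊢
    have he1 : ((Q : Int) + 1) * ((F.map List.length).sum : Int)
        = (Q : Int) * ((F.map List.length).sum : Int) + ((F.map List.length).sum : Int) := by ring
    have he2 : ((Q : Int) + 1 + 1) * ((F.map List.length).sum : Int)
        = (Q : Int) * ((F.map List.length).sum : Int) + ((F.map List.length).sum : Int)
          + ((F.map List.length).sum : Int) := by ring
    rw [he1] at h1
    rw [he2] at h2
    have hQs : (0 : Int) ≤ (Q : Int) * ((F.map List.length).sum : Int) :=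
      mul_nonneg (by positivity) (by positivity)
    have hlt : ((F.map List.length).sum : Int) < L + 1 - (m.length : Int) := by linarith
    have hFlen : (F.length : Int) ≤ ((F.map List.length).sum : Int) := by
      exact_mod_cast pvLenLeSum F htok
    have hfuelF : F.length ≤ fuel := by
      have : (F.length : Int) ≤ (fuel : Int) := by linarith
      exact_mod_cast this
    have hc : ((fuel - F.length : Nat) : Int) = (fuel : Int) - (F.length : Int) :=
      Nat.cast_sub hfuelF
    rw [pvFC L F htok F 0 m fuel rfl (by omega) hlt h3, pvReset]
    rw [ih (m ++ F.flatten) (fuel - F.length) ?_ ?_ ?_]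
    · have harg : L + 1 - ((m ++ F.flatten).length : Int)
          - (Q : Int) * ((F.map List.length).sum : Int)
          = L + 1 - (m.length : Int) - ((Q : Int) + 1) * ((F.map List.length).sum : Int) := by
        simp only [List.length_append, List.length_flatten]
        push_cast
        ring
      rw [harg]
      simp [List.replicate_succ]
    · simp only [List.length_append, List.length_flatten]
      push_cast
      push_cast at h1
      linarith
    · rw [he1]
      simp only [List.length_append, List.length_flatten]
      push_cast
      push_cast at h2
      linarith
    · simp only [List.length_append, List.length_flatten, hc]
      push_cast
      push_cast at h3 hFlen
      linarith

lemma pvEq (L : Int) (melody : String) (pre : Pre_makeRepeat L melody) :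
    makeRepeat L melody = makeRepeat_alt L melody := by
  unfold Pre_makeRepeat at pre
  unfold makeRepeat makeRepeat_alt
  dsimp only
  rw [PySem.List.len_eq]
  by_cases hlt : L < (melody.toList.length : Int)
  · rw [if_pos hlt]
    have hfuel : (L + 1 - (melody.toList.length : Int)).toNat = 0 := by omega
    rw [hfuel]
    exact String.ofList_toList
  · rw [if_neg hlt]
    have hF : PySem.Chars.split₀ melody.toList ≠ [] := by
      rcases pre with h | h
      · exfalso; rw [PySem.Str.len_eq] at h; omega
      · exact h
    set mel := melody.toList with hmel
    set F := PySem.Chars.split₀ mel with hFdef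
    have htok : ∀ t ∈ F, t ≠ [] := pvSplitNonempty mel
    rw [pvJoinFlatten, PySem.List.len_eq, List.length_flatten]
    have hspos : (0:Int) < ((F.map List.length).sum : Int) := by
      have h1 : 1 ≤ F.length := List.length_pos_iff.mpr hF
      have h2 := pvLenLeSum F htok
      have h3 : 0 < (F.map List.length).sum := by omega
      exact_mod_cast h3
    rw [PySem.Int.floordiv_eq_ediv_of_pos hspos]
    set q : Int := (L - (mel.length : Int) + 1 - 1) / ((F.map List.length).sum : Int) with hq
    have hdm : ((F.map List.length).sum : Int) * q
        + (L - (mel.length : Int) + 1 - 1) % ((F.map List.length).sum : Int)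
        = L - (mel.length : Int) + 1 - 1 := by
      rw [hq]; exact Int.mul_ediv_add_emod _ _
    have hm0 := Int.emod_nonneg (L - (mel.length : Int) + 1 - 1) (by omega : ((F.map List.length).sum : Int) ≠ 0)
    have hml := Int.emod_lt_of_pos (L - (mel.length : Int) + 1 - 1) hspos
    have hq0 : 0 ≤ q := Int.ediv_nonneg (by omega) (by omega)
    have hQ : ((q.toNat : Nat) : Int) = q := Int.toNat_of_nonneg hq0
    rw [pvMain L F htok q.toNat mel ((L + 1 - (mel.length : Int)).toNat) ?_ ?_ ?_]
    · rw [pvJoinFlatten (altScan _ F 0)]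
      have hrep : PySem.List.pyRepeat F.flatten q = (List.replicate q.toNat F.flatten).flatten := rfl
      rw [hrep]
      have harg : L + 1 - (mel.length : Int) - ((q.toNat : Nat) : Int) * ((F.map List.length).sum : Int)
          = L - (mel.length : Int) + 1 - q * ((F.map List.length).sum : Int) := by
        rw [hQ]; ring
      rw [harg]
    · rw [hQ, mul_comm]; omega
    · rw [hQ, add_mul, one_mul, mul_comm]; omega
    · omega

-- ===== VERDICT (by name: the statement is the Claim_ definition above) =====
theorem makeRepeat_spec : Claim_equal_makeRepeat := by
  intro L melody _ pre
  unfold Spec_makeRepeat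
  exact pvEq L melody pre
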